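-- pv_equiv track=rewrite | github.com/mintropy/PS | BAEKJOON/Python/2000/2300/2303.py | solution
-- ===== SOURCE A (Python) =====
-- from itertools import combinations
--
-- def solution(cards: list[tuple[int]]) -> int:
--     ans = max_unit_digit = 0
--     for idx, card in enumerate(cards):
--         _max_unit_digit = 0
--         for comb in combinations(card, 3):
--             unit_digit = sum(comb) % 10
--             if _max_unit_digit < unit_digit:
--                 _max_unit_digit = unit_digit
--         if max_unit_digit <= _max_unit_digit:
--             ans = idx + 1
--             max_unit_digit = _max_unit_digit
--     return ans
-- ===== SOURCE B (Python) =====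
-- def solution(cards: list[tuple[int]]) -> int:
--     digits = []
--     for card in cards:
--         res = [x % 10 for x in card]
--         best = 0
--         for i in range(10):
--             for j in range(i, 10):
--                 for k in range(j, 10):
--                     need = (i, j, k)
--                     if all(res.count(r) >= need.count(r) for r in need):
--                         s = (i + j + k) % 10
--                         if s > best:
--                             best = s
--         digits.append(best)
--     ans = 0
--     top = -1
--     for idx in range(len(digits) - 1, -1, -1):
--         if digits[idx] > top:
--             top = digits[idx]
--             ans = idx + 1
--     return ans
-- ===== Notes on version B (the rewrite author's own statement) =====
-- stated objective: faster
-- what changed: Per player, instead of scanning all C(k,3) card triples, B enumerates the at most 220 residue triples i<=j<=k in 0..9 and keeps those whose multiplicities fit the player's residue counts, then picks the last argmax by a single right-to-left scan over the per-player best digits.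
import Mathlib
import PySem

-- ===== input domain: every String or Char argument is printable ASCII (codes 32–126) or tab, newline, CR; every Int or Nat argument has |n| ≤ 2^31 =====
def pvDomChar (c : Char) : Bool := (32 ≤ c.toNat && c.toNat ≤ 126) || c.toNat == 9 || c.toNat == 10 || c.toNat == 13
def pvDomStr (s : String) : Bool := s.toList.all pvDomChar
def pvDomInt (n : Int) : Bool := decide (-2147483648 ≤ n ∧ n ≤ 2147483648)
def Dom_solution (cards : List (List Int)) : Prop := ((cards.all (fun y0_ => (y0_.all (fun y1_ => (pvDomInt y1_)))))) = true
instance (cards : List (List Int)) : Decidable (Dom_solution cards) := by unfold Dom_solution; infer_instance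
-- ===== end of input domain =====

-- B enumerates residue triples against residue counts instead of all card triples,
-- and picks the last argmax by a right-to-left scan: an asymptotically faster algorithm.


-- ===== PORT A =====
def solution (cards : List (List Int)) : Int :=
  (((PySem.List.enumerate cards 0).foldl (fun st p =>
      let inner := (PySem.List.combinations p.2 3).foldl (fun acc comb =>
          let d := PySem.Int.mod comb.sum 10
          if acc < d then d else acc) 0
      if st.2 ≤ inner then (p.1 + 1, inner) else st) ((0 : Int), (0 : Int)))).1

-- ===== PORT B =====
def bFeasible (res : List Int) (i j k : Int) : Bool :=
  -- all(res.count(r) >= need.count(r) for r in need) with need = (i, j, k)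
  [i, j, k].all (fun r => PySem.List.count [i, j, k] r ≤ PySem.List.count res r)

def bBest (res : List Int) : Int :=
  (PySem.List.pyRange 0 10 1).foldl (fun best i =>
    (PySem.List.pyRange i 10 1).foldl (fun best j =>
      (PySem.List.pyRange j 10 1).foldl (fun best k =>
        if bFeasible res i j k then
          let s := PySem.Int.mod (i + j + k) 10
          if s > best then s else best
        else best) best) best) 0

def solution_alt (cards : List (List Int)) : Int :=
  let digits := cards.map (fun card => bBest (card.map (fun x => PySem.Int.mod x 10)))
  (((PySem.List.pyRange ((digits.length : Int) - 1) (-1) (-1)).foldl (fun st idx =>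
      let d := PySem.List.pyGetD digits idx 0   -- digits[idx]; idx is always in range
      if d > st.2 then (idx + 1, d) else st) ((0 : Int), (-1 : Int)))).1

-- ===== PRECONDITION & SPEC =====
def Spec_solution (cards : List (List Int)) (out : Int) : Prop := out = solution_alt cards
instance (cards : List (List Int)) (out : Int) : Decidable (Spec_solution cards out) := by unfold Spec_solution; infer_instance

-- ===== CLAIM (what is proved, stated in full; the proofs are below) =====
def Claim_equal_solution : Prop := ∀ (cards : List (List Int)), Dom_solution cards → Spec_solution cards (solution cards)

-- ===== LEMMAS AND PROOFS =====

def bTriples : List (Int × Int × Int) :=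
  (PySem.List.pyRange 0 10 1).flatMap (fun i =>
    (PySem.List.pyRange i 10 1).flatMap (fun j =>
      (PySem.List.pyRange j 10 1).map (fun k => (i, j, k))))

theorem bBest_eq_triples (res : List Int) :
    bBest res = bTriples.foldl (fun b t =>
      if bFeasible res t.1 t.2.1 t.2.2 then
        (if PySem.Int.mod (t.1 + t.2.1 + t.2.2) 10 > b then PySem.Int.mod (t.1 + t.2.1 + t.2.2) 10 else b)
      else b) 0 := by
  simp only [bTriples, List.foldl_flatMap, List.foldl_map]
  rfl

theorem mem_bTriples (t : Int × Int × Int) :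
    t ∈ bTriples ↔ 0 ≤ t.1 ∧ t.1 ≤ t.2.1 ∧ t.2.1 ≤ t.2.2 ∧ t.2.2 < 10 := by
  obtain ⟨i, j, k⟩ := t
  simp only [bTriples, List.mem_flatMap, List.mem_map, PySem.List.mem_pyRange_one]
  constructor
  · rintro ⟨i', ⟨hi1, hi2⟩, j', ⟨hj1, hj2⟩, k', ⟨hk1, hk2⟩, heq⟩
    obtain ⟨rfl, rfl, rfl⟩ := Prod.mk.injEq .. ▸ heq
    exact ⟨hi1, hj1, hk1, hk2⟩
  · rintro ⟨h1, h2, h3, h4⟩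
    exact ⟨i, ⟨h1, by omega⟩, j, ⟨h2, by omega⟩, k, ⟨h3, h4⟩, rfl⟩

theorem bFeasible_iff (res : List Int) (i j k : Int) :
    bFeasible res i j k = true ↔ [i, j, k].Subperm res := by
  rw [List.subperm_ext_iff]
  simp only [bFeasible, List.all_eq_true, PySem.List.count_eq, decide_eq_true_eq]

theorem foldl_sel_char {β : Type} (p : β → Bool) (g : β → Int) (l : List β) (init : Int) :
    init ≤ l.foldl (fun b x => if p x then (if g x > b then g x else b) else b) init ∧
    (∀ x ∈ l, p x = true → g x ≤ l.foldl (fun b x => if p x then (if g x > b then g x else b) else b) init) ∧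
    (l.foldl (fun b x => if p x then (if g x > b then g x else b) else b) init = init ∨
      ∃ x ∈ l, p x = true ∧ g x = l.foldl (fun b x => if p x then (if g x > b then g x else b) else b) init) := by
  induction l generalizing init with
  | nil => exact ⟨le_refl _, by simp, Or.inl rfl⟩
  | cons x t ih =>
    simp only [List.foldl_cons]
    set b' := if p x then (if g x > init then g x else init) else init with hb'
    obtain ⟨h1, h2, h3⟩ := ih b'
    have hinit : init ≤ b' := by rw [hb']; split_ifs <;> omega
    refine ⟨le_trans hinit h1, ?_, ?_⟩
    · intro y hy hpy
      rcases List.mem_cons.mp hy with rfl | hyt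
      · refine le_trans ?_ h1
        rw [hb']; simp [hpy]; split_ifs <;> omega
      · exact h2 y hyt hpy
    · rcases h3 with heq | ⟨y, hyt, hpy, hgy⟩
      · rw [heq, hb']
        split_ifs with hp hg
        · exact Or.inr ⟨x, List.mem_cons_self, hp, by omega⟩
        · exact Or.inl rfl
        · exact Or.inl rfl
      · exact Or.inr ⟨y, List.mem_cons_of_mem _ hyt, hpy, hgy⟩

theorem mod10_nonneg_lt (x : Int) : 0 ≤ PySem.Int.mod x 10 ∧ PySem.Int.mod x 10 < 10 := by
  rw [PySem.Int.mod_eq_emod_of_pos (by norm_num)]; omega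

theorem aFold_eq_max (card : List Int) :
    (PySem.List.combinations card 3).foldl (fun acc comb =>
        let d := PySem.Int.mod comb.sum 10
        if acc < d then d else acc) 0
    = ((PySem.List.combinations card 3).map (fun c => PySem.Int.mod c.sum 10)).foldl max 0 := by
  rw [List.foldl_map]
  congr 1
  funext acc c
  show (if acc < PySem.Int.mod c.sum 10 then PySem.Int.mod c.sum 10 else acc) = _
  rw [max_def]; split_ifs <;> omega

theorem sum3_mod (c : List Int) (h3 : c.length = 3) (s : Int)
    (hs : (c.map (fun x => PySem.Int.mod x 10)).sum = s) :
    PySem.Int.mod c.sum 10 = PySem.Int.mod s 10 := by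
  obtain ⟨a, b, e, rfl⟩ := List.length_eq_three.mp h3
  simp only [List.map_cons, List.map_nil, List.sum_cons, List.sum_nil] at hs ⊢
  subst hs
  rw [PySem.Int.mod_eq_emod_of_pos (by norm_num), PySem.Int.mod_eq_emod_of_pos (by norm_num),
    PySem.Int.mod_eq_emod_of_pos (by norm_num), PySem.Int.mod_eq_emod_of_pos (by norm_num),
    PySem.Int.mod_eq_emod_of_pos (by norm_num)]
  omega

theorem X1 (card : List Int) (c : List Int) (hs : c.Sublist card) (hl : c.length = 3) :
    PySem.Int.mod c.sum 10 ≤ bBest (card.map (fun x => PySem.Int.mod x 10)) := by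
  set res := card.map (fun x => PySem.Int.mod x 10) with hres
  set rs := c.map (fun x => PySem.Int.mod x 10) with hrs
  have hperm : (PySem.List.sorted rs (fun x => x) false).Perm rs := PySem.List.sorted_perm rs _ false
  have hlen : (PySem.List.sorted rs (fun x => x) false).length = 3 := by
    rw [hperm.length_eq, hrs, List.length_map, hl]
  obtain ⟨i, j, k, hS⟩ := List.length_eq_three.mp hlen
  have hpw := PySem.List.sorted_pairwise rs (fun x => x)
  rw [hS] at hpw hperm
  simp only [List.pairwise_cons, List.mem_cons, List.not_mem_nil] at hpw
  have hij : i ≤ j := hpw.1 j (Or.inl rfl)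
  have hjk : j ≤ k := hpw.2.1 k (Or.inl rfl)
  have hmemrs : ∀ x ∈ rs, 0 ≤ x ∧ x < 10 := by
    intro x hx
    rw [hrs] at hx
    obtain ⟨y, _, rfl⟩ := List.mem_map.mp hx
    exact mod10_nonneg_lt y
  have hi := hmemrs i (hperm.mem_iff.mp (by simp))
  have hk := hmemrs k (hperm.mem_iff.mp (by simp))
  have hsub : [i, j, k].Subperm res := (hperm.subperm).trans ((hs.map _).subperm)
  have hsum : i + j + k = rs.sum := by
    have h := hperm.sum_eq
    simp at h
    omega
  have hdig : PySem.Int.mod c.sum 10 = PySem.Int.mod (i + j + k) 10 :=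
    sum3_mod c hl _ (by rw [← hrs, ← hsum])
  rw [hdig, bBest_eq_triples]
  have hchar := foldl_sel_char (fun t : Int × Int × Int => bFeasible res t.1 t.2.1 t.2.2)
      (fun t : Int × Int × Int => PySem.Int.mod (t.1 + t.2.1 + t.2.2) 10) bTriples 0
  exact hchar.2.1 (i, j, k) ((mem_bTriples _).mpr ⟨hi.1, hij, hjk, hk.2⟩)
      ((bFeasible_iff res i j k).mpr hsub)

theorem X2 (card : List Int) (i j k : Int)
    (hf : bFeasible (card.map (fun x => PySem.Int.mod x 10)) i j k = true) :
    ∃ c : List Int, c.Sublist card ∧ c.length = 3 ∧ PySem.Int.mod c.sum 10 = PySem.Int.mod (i + j + k) 10 := by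
  obtain ⟨l, hlp, hls⟩ := (bFeasible_iff _ i j k).mp hf
  rw [List.sublist_map_iff] at hls
  obtain ⟨c, hcs, rfl⟩ := hls
  have hlen : c.length = 3 := by
    have := hlp.length_eq
    simpa using this
  refine ⟨c, hcs, hlen, sum3_mod c hlen _ ?_⟩
  have h := hlp.sum_eq
  simp only [List.sum_cons, List.sum_nil] at h
  omega

theorem inner_eq (card : List Int) :
    (PySem.List.combinations card 3).foldl (fun acc comb =>
        let d := PySem.Int.mod comb.sum 10
        if acc < d then d else acc) 0
    = bBest (card.map (fun x => PySem.Int.mod x 10)) := by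
  rw [aFold_eq_max]
  have hAub := PySem.List.le_foldl_max ((PySem.List.combinations card 3).map (fun c => PySem.Int.mod c.sum 10)) 0
  have hAmem := PySem.List.foldl_max_mem ((PySem.List.combinations card 3).map (fun c => PySem.Int.mod c.sum 10)) 0
  have hB := foldl_sel_char
      (fun t : Int × Int × Int => bFeasible (card.map (fun x => PySem.Int.mod x 10)) t.1 t.2.1 t.2.2)
      (fun t : Int × Int × Int => PySem.Int.mod (t.1 + t.2.1 + t.2.2) 10) bTriples 0
  rw [← bBest_eq_triples] at hB
  apply le_antisymm
  · rcases hAmem with h0 | hmem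
    · rw [h0]; exact hB.1
    · obtain ⟨c, hcmem, hval⟩ := List.mem_map.mp hmem
      obtain ⟨hsub, hlen⟩ := (PySem.List.mem_combinations_iff card 3 c).mp hcmem
      rw [← hval]
      exact X1 card c hsub hlen
  · rcases hB.2.2 with h0 | ⟨t, htmem, hfe, hval⟩
    · rw [h0]; exact hAub.1
    · obtain ⟨c, hcs, hclen, hcmod⟩ := X2 card t.1 t.2.1 t.2.2 hfe
      rw [← hval, ← hcmod]
      exact hAub.2 _ (List.mem_map.mpr ⟨c, (PySem.List.mem_combinations_iff card 3 c).mpr ⟨hcs, hclen⟩, rfl⟩)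

theorem enumerate_map {α β : Type} (f : α → β) (xs : List α) (s : Int) :
    PySem.List.enumerate (xs.map f) s = (PySem.List.enumerate xs s).map (fun p => (p.1, f p.2)) := by
  induction xs generalizing s with
  | nil => simp [PySem.List.enumerate]
  | cons x t ih => simp [PySem.List.enumerate_cons, ih]

theorem afold_ref (ds : List Int) : ∀ (s ans m : Int), 0 ≤ m → (∀ d ∈ ds, 0 ≤ d) →
    (PySem.List.enumerate ds s).foldl (fun st p => if st.2 ≤ p.2 then (p.1 + 1, p.2) else st) (ans, m)
    = if m ≤ ((PySem.List.enumerate ds s).foldr (fun p st => if p.2 > st.2 then (p.1 + 1, p.2) else st) (0, -1)).2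
      then (PySem.List.enumerate ds s).foldr (fun p st => if p.2 > st.2 then (p.1 + 1, p.2) else st) (0, -1)
      else (ans, m) := by
  induction ds with
  | nil =>
    intro s ans m hm _
    simp only [PySem.List.enumerate, List.foldl_nil, List.foldr_nil]
    rw [if_neg (by omega)]
  | cons d t ih =>
    intro s ans m hm hall
    rw [PySem.List.enumerate_cons]
    simp only [List.foldl_cons, List.foldr_cons]
    set R := (PySem.List.enumerate t (s + 1)).foldr (fun p st => if p.2 > st.2 then (p.1 + 1, p.2) else st) (0, -1) with hR
    have hd : 0 ≤ d := hall d (by simp)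
    have htall : ∀ x ∈ t, 0 ≤ x := fun x hx => hall x (by simp [hx])
    by_cases hdr : d > R.2
    · rw [if_pos hdr]
      by_cases h1 : m ≤ d
      · rw [if_pos h1, ih (s + 1) (s + 1) d hd htall, ← hR, if_neg (by omega)]
      · rw [if_neg h1, ih (s + 1) ans m hm htall, ← hR, if_neg (by omega)]
    · rw [if_neg hdr]
      by_cases h1 : m ≤ d
      · rw [if_pos h1, ih (s + 1) (s + 1) d hd htall, ← hR, if_pos (by omega), if_pos (by omega)]
      · rw [if_neg h1, ih (s + 1) ans m hm htall, ← hR]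

theorem ref_snd_nonneg (ds : List Int) (s : Int) (hne : ds ≠ []) (hall : ∀ d ∈ ds, 0 ≤ d) :
    0 ≤ ((PySem.List.enumerate ds s).foldr (fun p st => if p.2 > st.2 then (p.1 + 1, p.2) else st) ((0 : Int), (-1 : Int))).2 := by
  cases ds with
  | nil => exact absurd rfl hne
  | cons d t =>
    rw [PySem.List.enumerate_cons]
    simp only [List.foldr_cons]
    have hd : 0 ≤ d := hall d (by simp)
    split_ifs with h
    · exact hd
    · simp only [not_lt] at h
      omega

theorem bfold_eq_ref (digits : List Int) :
    (PySem.List.pyRange ((digits.length : Int) - 1) (-1) (-1)).foldl (fun st idx =>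
        let d := PySem.List.pyGetD digits idx 0
        if d > st.2 then (idx + 1, d) else st) ((0 : Int), (-1 : Int))
    = (PySem.List.enumerate digits 0).foldr (fun p st => if p.2 > st.2 then (p.1 + 1, p.2) else st) ((0 : Int), (-1 : Int)) := by
  have h1 : PySem.List.pyRange ((digits.length : Int) - 1) (-1) (-1)
      = (PySem.List.pyRange 0 (digits.length : Int) 1).reverse := by
    rw [PySem.List.pyRange_neg_one_eq_reverse]
    ring_nf
  rw [h1, List.foldl_reverse, PySem.List.enumerate_eq_map_pyRange digits (0 : Int), List.foldr_map]
  simp [PySem.List.len_eq]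

theorem bBest_nonneg (res : List Int) : 0 ≤ bBest res := by
  rw [bBest_eq_triples]
  exact (foldl_sel_char (fun t : Int × Int × Int => bFeasible res t.1 t.2.1 t.2.2)
    (fun t : Int × Int × Int => PySem.Int.mod (t.1 + t.2.1 + t.2.2) 10) bTriples 0).1

-- ===== VERDICT (by name: the statement is the Claim_ definition above) =====
theorem solution_spec : Claim_equal_solution := by
  unfold Claim_equal_solution
  intro cards _
  unfold Spec_solution
  have hA : solution cards
      = ((PySem.List.enumerate (cards.map (fun card => bBest (card.map (fun x => PySem.Int.mod x 10)))) 0).foldl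
          (fun st p => if st.2 ≤ p.2 then (p.1 + 1, p.2) else st) ((0 : Int), (0 : Int))).1 := by
    unfold solution
    have hstep : (fun (st : Int × Int) (p : Int × List Int) =>
        let inner := (PySem.List.combinations p.2 3).foldl (fun acc comb =>
            let d := PySem.Int.mod comb.sum 10
            if acc < d then d else acc) 0
        if st.2 ≤ inner then (p.1 + 1, inner) else st)
        = fun (st : Int × Int) (p : Int × List Int) =>
            if st.2 ≤ bBest (p.2.map (fun x => PySem.Int.mod x 10))
            then (p.1 + 1, bBest (p.2.map (fun x => PySem.Int.mod x 10))) else st := by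
      funext st p
      simp only [inner_eq]
    rw [hstep, enumerate_map, List.foldl_map]
  have hB : solution_alt cards
      = ((PySem.List.enumerate (cards.map (fun card => bBest (card.map (fun x => PySem.Int.mod x 10)))) 0).foldr
          (fun p st => if p.2 > st.2 then (p.1 + 1, p.2) else st) ((0 : Int), (-1 : Int))).1 := by
    show ((PySem.List.pyRange (((cards.map (fun card => bBest (card.map (fun x => PySem.Int.mod x 10)))).length : Int) - 1) (-1) (-1)).foldl
        (fun st idx =>
          let d := PySem.List.pyGetD (cards.map (fun card => bBest (card.map (fun x => PySem.Int.mod x 10)))) idx 0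
          if d > st.2 then (idx + 1, d) else st) ((0 : Int), (-1 : Int))).1 = _
    rw [bfold_eq_ref]
  rw [hA, hB]
  set ds := cards.map (fun card => bBest (card.map (fun x => PySem.Int.mod x 10))) with hds
  have hall : ∀ d ∈ ds, 0 ≤ d := by
    intro d hd
    rw [hds] at hd
    obtain ⟨c, _, rfl⟩ := List.mem_map.mp hd
    exact bBest_nonneg _
  rw [afold_ref ds 0 0 0 (le_refl 0) hall]
  by_cases hne : ds = []
  · rw [hne]
    simp [PySem.List.enumerate]
  · rw [if_pos (ref_snd_nonneg ds 0 hne hall)]
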